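-- pv_equiv track=rewrite | github.com/dhruval30/databaes_meetScribe | data/app.py | get_max_individual_peak
-- ===== SOURCE A (Python) =====
-- def get_max_individual_peak(speakers):
--     num_parts = 10
--     max_peak = 0
--     for speaker in set(speakers):
--         speaker_time_data = [0] * num_parts
--         speaker_mentions = [i for i, sp in enumerate(speakers) if sp == speaker]
--         for mention in speaker_mentions:
--             time_slot = mention % num_parts
--             speaker_time_data[time_slot] += 1
--         max_peak = max(max_peak, max(speaker_time_data))
--     return max_peak
-- ===== SOURCE B (Python) =====
-- def get_max_individual_peak(speakers):
--     counts = {}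
--     for i, sp in enumerate(speakers):
--         key = (sp, i % 10)
--         counts[key] = counts.get(key, 0) + 1
--     return max(counts.values(), default=0)
-- ===== Notes on version B (the rewrite author's own statement) =====
-- stated objective: faster
-- what changed: Replaces the per-distinct-speaker rescan of the whole list (building a 10-slot array for each speaker) with a single pass that counts (speaker, index % 10) pairs in one dict and takes the max of its values.
import Mathlib
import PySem

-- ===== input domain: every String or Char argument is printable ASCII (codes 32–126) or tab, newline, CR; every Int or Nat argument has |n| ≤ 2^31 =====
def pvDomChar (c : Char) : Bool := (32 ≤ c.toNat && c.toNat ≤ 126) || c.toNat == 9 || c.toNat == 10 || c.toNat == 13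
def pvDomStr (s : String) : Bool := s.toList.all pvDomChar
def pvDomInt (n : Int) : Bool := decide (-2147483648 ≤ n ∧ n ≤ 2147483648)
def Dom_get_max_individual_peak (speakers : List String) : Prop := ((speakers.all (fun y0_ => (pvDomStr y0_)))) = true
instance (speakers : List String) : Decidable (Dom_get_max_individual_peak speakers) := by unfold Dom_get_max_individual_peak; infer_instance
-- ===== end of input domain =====

-- B replaces A's per-distinct-speaker rescan with a single pass counting (speaker, index % 10) keys in one dict (faster).


-- ===== PORT A =====
-- literal port of A: for each speaker in set(speakers), collect its mention indices,
-- bucket them mod 10 into a fresh 10-slot list, and fold the running max.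
-- 'max(speaker_time_data)' is ported as max? with .getD 0: the list always has 10 elements, so max? is never none.
def get_max_individual_peak (speakers : List String) : Int :=
  let num_parts : Int := 10
  (PySem.Set.ofList speakers).foldl
    (fun max_peak speaker =>
      let speaker_time_data := PySem.List.pyRepeat [(0 : Int)] num_parts
      let speaker_mentions :=
        ((PySem.List.enumerate speakers).filter (fun p => p.2 == speaker)).map (fun p => p.1)
      let speaker_time_data :=
        speaker_mentions.foldl
          (fun td mention =>
            let time_slot := PySem.Int.mod mention num_parts
            PySem.List.pySetD td time_slot (PySem.List.pyGetD td time_slot 0 + 1))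
          speaker_time_data
      max max_peak ((PySem.List.max? speaker_time_data (fun x => x)).getD 0))
    0

-- ===== PORT B =====
-- literal port of Source B: one pass building counts[(sp, i % 10)] and then max(counts.values(), default=0).
def get_max_individual_peak_alt (speakers : List String) : Int :=
  let counts : PySem.Dict (String × Int) Int :=
    (PySem.List.enumerate speakers).foldl
      (fun counts p =>
        let key := (p.2, PySem.Int.mod p.1 10)
        counts.insert key (counts.getD key 0 + 1))
      PySem.Dict.empty
  PySem.List.maxD (PySem.Dict.values counts) (fun x => x) 0

-- ===== PRECONDITION & SPEC =====
def Spec_get_max_individual_peak (speakers : List String) (out : Int) : Prop := out = get_max_individual_peak_alt speakers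
instance (speakers : List String) (out : Int) : Decidable (Spec_get_max_individual_peak speakers out) := by unfold Spec_get_max_individual_peak; infer_instance

-- ===== CLAIM (what is proved, stated in full; the proofs are below) =====
def Claim_equal_get_max_individual_peak : Prop := ∀ (speakers : List String), Dom_get_max_individual_peak speakers → Spec_get_max_individual_peak speakers (get_max_individual_peak speakers)

-- ===== LEMMAS AND PROOFS =====
-- the keys B counts: (speaker, index % 10) for each position
def pvKs (speakers : List String) : List (String × Int) :=
  (PySem.List.enumerate speakers).map (fun p => (p.2, PySem.Int.mod p.1 10))

-- the count both programs compute for one (speaker, slot) key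
def pvCnt (speakers : List String) (k : String × Int) : Int :=
  ((pvKs speakers).count k : Int)

-- A's inner increment step
def pvStep (td : List Int) (mention : Int) : List Int :=
  PySem.List.pySetD td (PySem.Int.mod mention 10) (PySem.List.pyGetD td (PySem.Int.mod mention 10) 0 + 1)

def pvMentions (speakers : List String) (s : String) : List Int :=
  ((PySem.List.enumerate speakers).filter (fun p => p.2 == s)).map (fun p => p.1)

def pvArr (speakers : List String) (s : String) : List Int :=
  (pvMentions speakers s).foldl pvStep (List.replicate 10 (0 : Int))

lemma pv_foldl_max_le {α : Type} (l : List α) (f : α → Int) (c : Int) :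
    ∀ a : Int, a ≤ c → (∀ x ∈ l, f x ≤ c) → l.foldl (fun acc x => max acc (f x)) a ≤ c := by
  induction l with
  | nil => intro a ha _; simpa using ha
  | cons x t ih =>
    intro a ha hf
    simp only [List.foldl_cons]
    exact ih _ (max_le ha (hf x (by simp))) (fun y hy => hf y (by simp [hy]))

lemma pv_foldl_max_le' (l : List Int) (c : Int) :
    ∀ a : Int, a ≤ c → (∀ x ∈ l, x ≤ c) → l.foldl max a ≤ c :=
  pv_foldl_max_le l (fun x => x) c

lemma pv_step_get_one (a : List Int) (ha : a.length = 10) (m j : Int) (hj0 : 0 ≤ j) (hj : j < 10) :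
    PySem.List.pyGetD (pvStep a m) j 0
      = PySem.List.pyGetD a j 0 + (if PySem.Int.mod m 10 == j then 1 else 0) := by
  have h0 : 0 ≤ PySem.Int.mod m 10 := PySem.Int.mod_nonneg m (by norm_num)
  have h1 : PySem.Int.mod m 10 < 10 := PySem.Int.mod_lt m (by norm_num)
  set t := PySem.Int.mod m 10 with ht
  rw [pvStep, ← ht, PySem.List.pySetD_of_nonneg _ _ h0,
      PySem.List.pyGetD_of_nonneg _ _ hj0, PySem.List.pyGetD_of_nonneg _ _ hj0,
      PySem.List.pyGetD_of_nonneg _ _ h0]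
  rw [List.getD_eq_getElem?_getD, List.getD_eq_getElem?_getD, List.getD_eq_getElem?_getD,
      List.getElem?_set]
  by_cases he : t = j
  · subst he
    have hlt : t.toNat < a.length := by omega
    simp [hlt]
  · have hne : t.toNat ≠ j.toNat := by omega
    simp [hne, he]

lemma pv_step_get (ms : List Int) (a : List Int) (ha : a.length = 10) (j : Int)
    (hj0 : 0 ≤ j) (hj : j < 10) :
    PySem.List.pyGetD (ms.foldl pvStep a) j 0
      = PySem.List.pyGetD a j 0 + (ms.countP (fun m => PySem.Int.mod m 10 == j) : Int) := by
  induction ms generalizing a with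
  | nil => simp
  | cons m t ih =>
    have ha' : (pvStep a m).length = 10 := by
      simp [pvStep, PySem.List.length_pySetD, ha]
    rw [List.foldl_cons, ih _ ha', pv_step_get_one a ha m j hj0 hj, List.countP_cons]
    by_cases h : PySem.Int.mod m 10 == j <;> simp only [h, if_true] <;> push_cast <;> ring

lemma pv_step_len (ms : List Int) (a : List Int) : (ms.foldl pvStep a).length = a.length := by
  induction ms generalizing a with
  | nil => rfl
  | cons m t ih => simp [List.foldl_cons, ih, pvStep, PySem.List.length_pySetD]

lemma pv_arr_len (speakers : List String) (s : String) : (pvArr speakers s).length = 10 := by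
  rw [pvArr, pv_step_len]
  simp

lemma pv_count_bridge (speakers : List String) (s : String) (j : Int) :
    ((pvMentions speakers s).countP (fun m => PySem.Int.mod m 10 == j) : Int) = pvCnt speakers (s, j) := by
  rw [pvMentions, pvCnt, pvKs, List.count_eq_countP, List.countP_map, List.countP_map,
      List.countP_filter]
  congr 1
  apply List.countP_congr
  intro p _
  simp [Function.comp, beq_iff_eq, Prod.ext_iff]
  tauto

lemma pv_arr_get (speakers : List String) (s : String) (j : Int) (hj0 : 0 ≤ j) (hj : j < 10) :
    PySem.List.pyGetD (pvArr speakers s) j 0 = pvCnt speakers (s, j) := by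
  rw [pvArr, pv_step_get _ _ (by simp) j hj0 hj, pv_count_bridge,
      PySem.List.pyGetD_of_nonneg _ _ hj0]
  have hz : (List.replicate 10 (0 : Int)).getD j.toNat 0 = 0 := by
    rw [List.getD_eq_getElem?_getD, List.getElem?_replicate]
    split <;> rfl
  rw [hz, zero_add]

lemma pv_A_eq (speakers : List String) :
    get_max_individual_peak speakers
      = (PySem.Set.ofList speakers).foldl
          (fun acc s => max acc ((PySem.List.max? (pvArr speakers s) (fun x => x)).getD 0)) 0 := rfl

lemma pv_dict_eq (speakers : List String) :
    (PySem.List.enumerate speakers).foldl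
      (fun counts p =>
        counts.insert (p.2, PySem.Int.mod p.1 10) (counts.getD (p.2, PySem.Int.mod p.1 10) 0 + 1))
      PySem.Dict.empty
    = PySem.Dict.counter (pvKs speakers) := by
  rw [← PySem.Dict.foldl_insert_getD_add_one_eq_counter, pvKs, List.foldl_map]

lemma pv_values_counter (speakers : List String) :
    PySem.Dict.values (PySem.Dict.counter (pvKs speakers))
      = (PySem.Set.ofList (pvKs speakers)).map (fun k => pvCnt speakers k) := by
  rw [PySem.Dict.values, PySem.Dict.items_counter, List.map_map]
  rfl

lemma pv_maxD_nonneg (l : List Int) (h : ∀ x ∈ l, 0 ≤ x) :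
    PySem.List.maxD l (fun x => x) 0 = l.foldl max 0 := by
  cases l with
  | nil => rfl
  | cons x t =>
    rw [PySem.List.maxD, PySem.List.max?_id_cons]
    have hx : max 0 x = x := max_eq_right (h x (by simp))
    simp [hx]

lemma pv_B_eq (speakers : List String) :
    get_max_individual_peak_alt speakers
      = (((PySem.Set.ofList (pvKs speakers)).map (fun k => pvCnt speakers k)).foldl max 0) := by
  show PySem.List.maxD _ _ _ = _
  rw [pv_dict_eq, pv_values_counter, pv_maxD_nonneg]
  intro x hx
  obtain ⟨k, _, rfl⟩ := List.mem_map.mp hx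
  exact Int.natCast_nonneg _

-- A's nonempty 10-slot list always has a max; it is one of the (speaker, slot) counts, and dominates all of them
lemma pv_arr_max (speakers : List String) (s : String) :
    ∃ m, PySem.List.max? (pvArr speakers s) (fun x => x) = some m ∧
      (∃ j : Int, 0 ≤ j ∧ j < 10 ∧ m = pvCnt speakers (s, j)) ∧
      (∀ j : Int, 0 ≤ j → j < 10 → pvCnt speakers (s, j) ≤ m) := by
  cases hm : PySem.List.max? (pvArr speakers s) (fun x => x) with
  | none =>
    exfalso
    have h1 := (PySem.List.max?_eq_none_iff (pvArr speakers s) (fun x => x)).mp hm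
    have h2 := pv_arr_len speakers s
    rw [h1] at h2
    simp at h2
  | some m =>
    refine ⟨m, rfl, ?_, ?_⟩
    · obtain ⟨j, hj, hje⟩ := List.mem_iff_getElem.mp (PySem.List.max?_mem hm)
      have hl : (pvArr speakers s).length = 10 := pv_arr_len speakers s
      refine ⟨(j : Int), by omega, by omega, ?_⟩
      rw [← pv_arr_get speakers s (j : Int) (by omega) (by omega),
          PySem.List.pyGetD_eq_getElem _ _ (by omega) (by omega)]
      simpa using hje.symm
    · intro j hj0 hj
      have hl : (pvArr speakers s).length = 10 := pv_arr_len speakers s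
      rw [← pv_arr_get speakers s j hj0 hj,
          PySem.List.pyGetD_eq_getElem _ _ hj0 (by omega)]
      exact PySem.List.max?_isMax hm _ (List.getElem_mem _)

-- ===== VERDICT (by name: the statement is the Claim_ definition above) =====
theorem get_max_individual_peak_spec : Claim_equal_get_max_individual_peak := by
  intro speakers _
  show get_max_individual_peak speakers = get_max_individual_peak_alt speakers
  rw [pv_A_eq, pv_B_eq]
  have hB := PySem.List.le_foldl_max ((PySem.Set.ofList (pvKs speakers)).map (fun k => pvCnt speakers k)) 0
  have hA := PySem.List.le_foldl_max_int (PySem.Set.ofList speakers)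
      (fun s => (PySem.List.max? (pvArr speakers s) (fun x => x)).getD 0) 0
  apply le_antisymm
  · -- A ≤ B: each per-speaker max is one of the counts, hence in B's value list (or 0)
    apply pv_foldl_max_le _ _ _ 0 hB.1
    intro s _
    obtain ⟨m, hm, ⟨j, hj0, hj, hmj⟩, _⟩ := pv_arr_max speakers s
    rw [hm]
    show m ≤ _
    by_cases hz : pvCnt speakers (s, j) = 0
    · rw [hmj, hz]; exact hB.1
    · apply hB.2
      apply List.mem_map.mpr
      refine ⟨(s, j), ?_, hmj.symm⟩
      rw [PySem.Set.mem_ofList]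
      have : 0 < (pvKs speakers).count (s, j) := by
        rcases Nat.eq_zero_or_pos ((pvKs speakers).count (s, j)) with h | h
        · exact absurd (by simp [pvCnt, h]) hz
        · exact h
      exact List.count_pos_iff.mp this
  · -- B ≤ A: each count in B's list is a slot of its speaker's array, hence ≤ that speaker's max ≤ A
    apply pv_foldl_max_le' _ _ 0 hA.1
    intro x hx
    obtain ⟨k, hk, rfl⟩ := List.mem_map.mp hx
    have hkks : k ∈ pvKs speakers := (PySem.Set.mem_ofList _ _).mp hk
    obtain ⟨p, hp, hpk⟩ := List.mem_map.mp hkks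
    have hs : p.2 ∈ speakers := by
      have := PySem.List.map_snd_enumerate speakers 0
      rw [← this]
      exact List.mem_map_of_mem hp
    obtain ⟨m, hm, _, hdom⟩ := pv_arr_max speakers p.2
    have h0 : 0 ≤ PySem.Int.mod p.1 10 := PySem.Int.mod_nonneg p.1 (by norm_num)
    have h1 : PySem.Int.mod p.1 10 < 10 := PySem.Int.mod_lt p.1 (by norm_num)
    calc pvCnt speakers k = pvCnt speakers (p.2, PySem.Int.mod p.1 10) := by rw [hpk]
      _ ≤ m := hdom _ h0 h1
      _ = (PySem.List.max? (pvArr speakers p.2) (fun x => x)).getD 0 := by simp [hm]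
      _ ≤ _ := hA.2 p.2 ((PySem.Set.mem_ofList _ _).mpr hs)
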